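-- pv_equiv track=rewrite | github.com/rebuilder945/FL_research | ast_research/python_code_5.23/lastterm_page7/success_code/张文博-3225-2023-06-10_21_21_13.py | work
-- ===== SOURCE A (Python) =====
-- def work(a) :
--     b=[]
--     c=[1]
--     for x in range(a+1):
--         b.append(x)
--         c.append(c[x]*(x+1))
--
--     d=dict(zip(b,c))
--     return d
-- ===== SOURCE B (Python) =====
-- import math
--
-- def work(a):
--     return {x: math.factorial(x) for x in range(a + 1)}
-- ===== Notes on version B (the rewrite author's own statement) =====
-- stated objective: idiomatic
-- what changed: Replaces the two auxiliary lists, the incremental cumulative-product recurrence c[x+1]=c[x]*(x+1) and the zip/dict construction with a single dict comprehension that computes each factorial independently via math.factorial.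
import Mathlib
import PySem

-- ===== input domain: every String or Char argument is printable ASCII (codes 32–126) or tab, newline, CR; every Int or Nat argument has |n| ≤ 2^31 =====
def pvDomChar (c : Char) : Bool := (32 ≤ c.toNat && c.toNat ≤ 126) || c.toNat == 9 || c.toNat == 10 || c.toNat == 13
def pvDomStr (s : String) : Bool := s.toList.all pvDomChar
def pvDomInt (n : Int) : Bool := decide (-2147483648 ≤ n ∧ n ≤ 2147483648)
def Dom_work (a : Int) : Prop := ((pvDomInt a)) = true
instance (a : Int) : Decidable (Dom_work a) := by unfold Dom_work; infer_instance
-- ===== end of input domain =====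

-- B replaces A's incremental cumulative-product recurrence (two auxiliary lists + zip + dict)
-- with a single dict comprehension computing each factorial independently (more idiomatic).

-- ===== PORT A =====
-- b, c accumulated by the loop; c[x] read via pyGetD (always in range here, so the default is never used)
def work (a : Int) : List (Int × Int) :=
  let s := (PySem.List.pyRange 0 (a + 1) 1).foldl
    (fun (s : List Int × List Int) x =>
      (s.1 ++ [x], s.2 ++ [PySem.List.pyGetD s.2 x 0 * (x + 1)]))
    ([], [1])
  (PySem.Dict.ofList (s.1.zip s.2)).items

-- ===== PORT B =====
-- math.factorial on a nonnegative int (every x in range(a+1) is ≥ 0)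
def pyFactorial (n : Int) : Int := Int.ofNat (Nat.factorial n.toNat)

def work_alt (a : Int) : List (Int × Int) :=
  (PySem.Dict.ofList ((PySem.List.pyRange 0 (a + 1) 1).map (fun x => (x, pyFactorial x)))).items

-- ===== PRECONDITION & SPEC =====
def Spec_work (a : Int) (out : List (Int × Int)) : Prop := out = work_alt a
instance (a : Int) (out : List (Int × Int)) : Decidable (Spec_work a out) := by unfold Spec_work; infer_instance

-- ===== CLAIM (what is proved, stated in full; the proofs are below) =====
def Claim_equal_work : Prop := ∀ (a : Int), Dom_work a → Spec_work a (work a)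

-- ===== LEMMAS AND PROOFS =====

-- the loop invariant: after processing 0..n-1, b = [0,…,n-1] and c = [0!,…,n!]
theorem work_loop_inv (n : Nat) :
    ((List.range n).map Int.ofNat).foldl
      (fun (s : List Int × List Int) x =>
        (s.1 ++ [x], s.2 ++ [PySem.List.pyGetD s.2 x 0 * (x + 1)]))
      ([], [1])
    = ((List.range n).map Int.ofNat,
       (List.range (n + 1)).map (fun k => Int.ofNat (Nat.factorial k))) := by
  induction n with
  | zero => simp [List.range_succ]
  | succ n ih =>
    rw [List.range_succ, List.map_append, List.foldl_append, ih]
    simp only [List.map_cons, List.map_nil, List.foldl_cons, List.foldl_nil]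
    have hget : PySem.List.pyGetD ((List.range (n + 1)).map (fun k => Int.ofNat (Nat.factorial k)))
        (Int.ofNat n) 0 = Int.ofNat (Nat.factorial n) := by
      rw [Int.ofNat_eq_natCast, PySem.List.pyGetD_natCast]
      simp [List.getD_eq_getElem?_getD]
    rw [hget]
    refine Prod.ext ?_ ?_
    · simp
    · show _ ++ [Int.ofNat (Nat.factorial n) * (Int.ofNat n + 1)] = _
      rw [List.range_succ (n := n + 1), List.map_append]
      simp [Nat.factorial_succ]
      ring

theorem zip_fact (n : Nat) :
    ((List.range n).map Int.ofNat).zip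
      ((List.range (n + 1)).map (fun k => Int.ofNat (Nat.factorial k)))
    = (List.range n).map (fun k => (Int.ofNat k, Int.ofNat (Nat.factorial k))) := by
  apply List.ext_getElem
  · simp [List.length_zip]
  · intro i h1 h2
    simp only [List.length_zip, List.length_map, List.length_range] at h1
    simp [List.getElem_zip, List.getElem_map, List.getElem_range]

theorem work_spec : Claim_equal_work := by
  intro a _
  unfold Spec_work work work_alt
  have hr : PySem.List.pyRange 0 (a + 1) 1 = (List.range (a + 1).toNat).map Int.ofNat := by
    rw [PySem.List.pyRange_one]
    simp [Int.ofNat_eq_natCast]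
  rw [hr, work_loop_inv ((a + 1).toNat)]
  simp only [zip_fact]
  simp [pyFactorial, List.map_map, Function.comp_def]
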